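-- pv_equiv track=rewrite | github.com/Jaeyeop-Jung/CodingTest | 코딩테스트/진주심연/3.py | solution
-- ===== SOURCE A (Python) =====
-- from itertools import combinations
--
-- def solution(phone_number, birthday):
--     no = set()
--     phone_number = phone_number[5:]
--     p = list(phone_number)
--     b = list(birthday)
--
--     for i in combinations(p, 4):
--         no.add(''.join(i))
--
--     for i in combinations(b, 4):
--         no.add(''.join(i))
--
--     res = 0
--     for i in range(10000):
--         cur = str(i).rjust(4, '0')
--         if cur in no:
--             continue
--         for num in range(10):
--             if 3 <= cur.count(str(num)):
--                 break
--         else: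
--             res += 1
--     return res
-- ===== SOURCE B (Python) =====
-- from itertools import combinations
--
-- def solution(phone_number, birthday):
--     # forbidden strings, built exactly as the original does
--     no = set()
--     for i in combinations(list(phone_number[5:]), 4):
--         no.add(''.join(i))
--     for i in combinations(list(birthday), 4):
--         no.add(''.join(i))
--
--     def ok(s):
--         return all(s.count(d) < 3 for d in "0123456789")
--
--     total = sum(1 for i in range(10000) if ok(str(i).rjust(4, '0')))
--     bad = sum(1 for s in no if len(s) == 4 and s.isdigit() and ok(s))
--     return total - bad
-- ===== Notes on version B (the rewrite author's own statement) =====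
-- stated objective: alternative
-- what changed: B counts by complement: it counts all 4-digit strings passing the no-digit-appearing-3-times filter, then subtracts the forbidden strings (built as in A) that are 4-digit, numeric and pass the same filter, instead of A's single loop that tests membership in the forbidden set for each of the 10000 candidates.
import Mathlib
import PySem

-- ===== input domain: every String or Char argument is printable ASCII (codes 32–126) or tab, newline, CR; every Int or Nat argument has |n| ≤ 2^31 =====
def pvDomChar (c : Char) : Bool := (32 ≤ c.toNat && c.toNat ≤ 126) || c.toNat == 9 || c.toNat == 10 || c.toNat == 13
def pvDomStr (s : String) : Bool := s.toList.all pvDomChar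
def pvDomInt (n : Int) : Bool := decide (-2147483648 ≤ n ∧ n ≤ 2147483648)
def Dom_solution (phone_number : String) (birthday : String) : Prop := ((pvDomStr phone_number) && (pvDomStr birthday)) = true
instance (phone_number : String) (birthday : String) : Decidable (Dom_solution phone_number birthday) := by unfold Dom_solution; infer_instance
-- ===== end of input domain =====

set_option maxRecDepth 8000

-- B counts by complement (all valid 4-digit strings minus the forbidden ones that are valid)
-- instead of A's per-candidate membership test; same cost class, different decomposition.

-- ===== PORT A =====
-- str(i).rjust(4, '0'): PySem has no rjust; hand port, exact — left-pad with the fill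
-- character up to the width (Python pads n - len(s) copies in front when len(s) < n).
def pvRjust (cs : List Char) (w : Nat) (f : Char) : List Char :=
  List.replicate (w - cs.length) f ++ cs

-- cur = str(i).rjust(4, '0')   (''-join-free: String.ofList is exact for joining chars)
def pvCur (i : Int) : String := String.ofList (pvRjust (PySem.Int.toStr i).toList 4 '0')

-- "for i in combinations(xs, 4): no.add(''.join(i))"  (''.join of a tuple of chars)
def pvAddJoined (s : PySem.Set String) (combos : List (List Char)) : PySem.Set String :=
  combos.foldl (fun s c => PySem.Set.add s (String.ofList c)) s

-- the forbidden set `no` (identical in A and in B, per both Python sources)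
def pvNo (phone_number : String) (birthday : String) : PySem.Set String :=
  let p := (PySem.Str.slice phone_number (some 5) none).toList
  let b := birthday.toList
  pvAddJoined (pvAddJoined PySem.Set.empty (PySem.List.combinations p 4)) (PySem.List.combinations b 4)

def solution (phone_number : String) (birthday : String) : Int :=
  let no := pvNo phone_number birthday
  (PySem.List.pyRange 0 10000 1).foldl (fun res i =>
    let cur := pvCur i
    if PySem.Set.contains no cur then res
    else if (PySem.List.pyRange 0 10 1).any
        (fun num => decide (3 ≤ PySem.Str.count cur (PySem.Int.toStr num))) then res
    else res + 1) 0

-- ===== PORT B =====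
-- ok(s) = all(s.count(d) < 3 for d in "0123456789")
def pvOk (s : String) : Bool :=
  "0123456789".toList.all (fun d => decide (PySem.Str.count s (String.ofList [d]) < 3))

def solution_alt (phone_number : String) (birthday : String) : Int :=
  let no := pvNo phone_number birthday
  let total := (PySem.List.pyRange 0 10000 1).foldl
    (fun acc i => if pvOk (pvCur i) then acc + 1 else acc) (0 : Int)
  let bad := no.foldl
    (fun acc s => if (PySem.Str.len s == 4) && PySem.Str.strIsdigit s && pvOk s then acc + 1 else acc) (0 : Int)
  total - bad

-- ===== PRECONDITION & SPEC =====
def Spec_solution (phone_number : String) (birthday : String) (out : Int) : Prop := out = solution_alt phone_number birthday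
instance (phone_number : String) (birthday : String) (out : Int) : Decidable (Spec_solution phone_number birthday out) := by unfold Spec_solution; infer_instance

-- ===== CLAIM (what is proved, stated in full; the proofs are below) =====
def Claim_equal_solution : Prop := ∀ (phone_number : String) (birthday : String), Dom_solution phone_number birthday → Spec_solution phone_number birthday (solution phone_number birthday)

-- ===== LEMMAS AND PROOFS =====

-- the four digit characters of n < 10000, most significant first
def pvEnc (n : Nat) : List Char :=
  [Nat.digitChar (n / 1000 % 10), Nat.digitChar (n / 100 % 10),
   Nat.digitChar (n / 10 % 10), Nat.digitChar (n % 10)]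

theorem pvChar_eq_of_toNat (c d : Char) (h : c.toNat = d.toNat) : c = d := by
  rw [Char.ext_iff, ← UInt32.toNat_inj]; exact h

theorem pvDigitChar_toNat (k : Nat) (hk : k < 10) : (Nat.digitChar k).toNat = 48 + k := by
  interval_cases k <;> decide

theorem pvDigitChar_inj (a b : Nat) (ha : a < 10) (hb : b < 10)
    (h : Nat.digitChar a = Nat.digitChar b) : a = b := by
  have := congrArg Char.toNat h
  rw [pvDigitChar_toNat a ha, pvDigitChar_toNat b hb] at this
  omega

theorem pvIsdigit_digitChar (k : Nat) (hk : k < 10) : PySem.Chars.isdigit (Nat.digitChar k) = true := by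
  interval_cases k <;> decide

theorem pvIsdigit_eq (c : Char) (h : PySem.Chars.isdigit c = true) :
    c = Nat.digitChar (c.toNat - 48) ∧ c.toNat - 48 < 10 := by
  simp only [PySem.Chars.isdigit, Bool.and_eq_true, decide_eq_true_iff] at h
  obtain ⟨h1, h2⟩ := h
  rw [Char.le_def] at h1 h2
  have hn1 : 48 ≤ c.toNat := h1
  have hn2 : c.toNat ≤ 57 := h2
  refine ⟨?_, by omega⟩
  apply pvChar_eq_of_toNat
  rw [pvDigitChar_toNat (c.toNat - 48) (by omega)]
  omega

theorem pvCur_toList (n : Nat) (hn : n < 10000) : (pvCur (n : Int)).toList = pvEnc n := by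
  have htd : (PySem.Int.toStr (n : Int)).toList = Nat.toDigits 10 n := by
    rw [PySem.Int.toList_toStr]
    simp [PySem.Int.toChars]
  have hb : (1 : Nat) < 10 := by norm_num
  have d0 : Nat.digitChar 0 = '0' := rfl
  rcases lt_or_ge n 10 with h1 | h1
  · have ht : Nat.toDigits 10 n = [Nat.digitChar n] := Nat.toDigits_of_lt_base h1
    have e1 : n / 1000 % 10 = 0 := by omega
    have e2 : n / 100 % 10 = 0 := by omega
    have e3 : n / 10 % 10 = 0 := by omega
    have e4 : n % 10 = n := by omega
    simp [pvCur, pvRjust, pvEnc, htd, ht, e1, e2, e3, e4, d0, List.replicate]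
  · rcases lt_or_ge n 100 with h2 | h2
    · have ht : Nat.toDigits 10 n = [Nat.digitChar (n / 10), Nat.digitChar (n % 10)] := by
        rw [Nat.toDigits_of_base_le hb h1, Nat.toDigits_of_lt_base (by omega)]
        simp
      have e1 : n / 1000 % 10 = 0 := by omega
      have e2 : n / 100 % 10 = 0 := by omega
      have e3 : n / 10 % 10 = n / 10 := by omega
      simp [pvCur, pvRjust, pvEnc, htd, ht, e1, e2, e3, d0, List.replicate]
    · rcases lt_or_ge n 1000 with h3 | h3
      · have hdd : n / 10 / 10 = n / 100 := by omega
        have ht : Nat.toDigits 10 n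
            = [Nat.digitChar (n / 100), Nat.digitChar (n / 10 % 10), Nat.digitChar (n % 10)] := by
          rw [Nat.toDigits_of_base_le hb h1, Nat.toDigits_of_base_le hb (by omega), hdd,
            Nat.toDigits_of_lt_base (by omega)]
          simp
        have e1 : n / 1000 % 10 = 0 := by omega
        have e2 : n / 100 % 10 = n / 100 := by omega
        simp [pvCur, pvRjust, pvEnc, htd, ht, e1, e2, d0]
      · have hdd : n / 10 / 10 = n / 100 := by omega
        have hddd : n / 100 / 10 = n / 1000 := by omega
        have ht : Nat.toDigits 10 n
            = [Nat.digitChar (n / 1000), Nat.digitChar (n / 100 % 10),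
               Nat.digitChar (n / 10 % 10), Nat.digitChar (n % 10)] := by
          rw [Nat.toDigits_of_base_le hb h1, Nat.toDigits_of_base_le hb (by omega), hdd,
            Nat.toDigits_of_base_le hb (by omega), hddd,
            Nat.toDigits_of_lt_base (by omega)]
          simp
        have e1 : n / 1000 % 10 = n / 1000 := by omega
        simp [pvCur, pvRjust, pvEnc, htd, ht, e1]

-- M: the list of the 10000 candidate strings
def pvM : List String := (PySem.List.pyRange 0 10000 1).map pvCur

theorem pvR_nodup : (PySem.List.pyRange 0 10000 1).Nodup :=
  PySem.List.nodup_pyRange_one 0 10000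

theorem pvM_nodup : pvM.Nodup := by
  rw [pvM]
  refine List.Nodup.map_on ?_ pvR_nodup
  intro x hx y hy hxy
  rw [PySem.List.mem_pyRange_iff_of_pos (by norm_num)] at hx hy
  obtain ⟨hx0, hx1, -⟩ := hx
  obtain ⟨hy0, hy1, -⟩ := hy
  lift x to Nat using hx0 with xn
  lift y to Nat using hy0 with yn
  have hxn : xn < 10000 := by exact_mod_cast hx1
  have hyn : yn < 10000 := by exact_mod_cast hy1
  have h := congrArg String.toList hxy
  rw [pvCur_toList xn hxn, pvCur_toList yn hyn] at h
  simp only [pvEnc, List.cons.injEq, and_true] at h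
  obtain ⟨t1, t2, t3, t4⟩ := h
  have u1 := pvDigitChar_inj _ _ (Nat.mod_lt _ (by norm_num)) (Nat.mod_lt _ (by norm_num)) t1
  have u2 := pvDigitChar_inj _ _ (Nat.mod_lt _ (by norm_num)) (Nat.mod_lt _ (by norm_num)) t2
  have u3 := pvDigitChar_inj _ _ (Nat.mod_lt _ (by norm_num)) (Nat.mod_lt _ (by norm_num)) t3
  have u4 := pvDigitChar_inj _ _ (Nat.mod_lt _ (by norm_num)) (Nat.mod_lt _ (by norm_num)) t4
  have : xn = yn := by omega
  exact_mod_cast congrArg (fun k : Nat => (k : Int)) this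

-- digit4 characterisation of membership in pvM
theorem pvMem_M_iff (s : String) :
    s ∈ pvM ↔ (s.toList.length = 4 ∧ s.toList.all PySem.Chars.isdigit = true) := by
  constructor
  · intro hs
    simp only [pvM, List.mem_map] at hs
    obtain ⟨i, hi, hcur⟩ := hs
    rw [PySem.List.mem_pyRange_iff_of_pos (by norm_num)] at hi
    obtain ⟨hi0, hi1, -⟩ := hi
    lift i to Nat using hi0 with n
    have hn : n < 10000 := by exact_mod_cast hi1
    rw [← hcur, pvCur_toList n hn]
    refine ⟨rfl, ?_⟩
    simp only [pvEnc, List.all_cons, List.all_nil, Bool.and_eq_true, and_true]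
    exact ⟨pvIsdigit_digitChar _ (Nat.mod_lt _ (by norm_num)),
      pvIsdigit_digitChar _ (Nat.mod_lt _ (by norm_num)),
      pvIsdigit_digitChar _ (Nat.mod_lt _ (by norm_num)),
      pvIsdigit_digitChar _ (Nat.mod_lt _ (by norm_num))⟩
  · rintro ⟨hlen, hdig⟩
    rcases hl : s.toList with _ | ⟨c0, _ | ⟨c1, _ | ⟨c2, _ | ⟨c3, _ | _⟩⟩⟩⟩ <;>
      rw [hl] at hlen <;> simp at hlen
    rw [hl] at hdig
    simp only [List.all_cons, List.all_nil, Bool.and_eq_true, and_true] at hdig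
    obtain ⟨d0, d1, d2, d3⟩ := hdig
    obtain ⟨e0, k0⟩ := pvIsdigit_eq c0 d0
    obtain ⟨e1, k1⟩ := pvIsdigit_eq c1 d1
    obtain ⟨e2, k2⟩ := pvIsdigit_eq c2 d2
    obtain ⟨e3, k3⟩ := pvIsdigit_eq c3 d3
    set n : Nat := (c0.toNat - 48) * 1000 + (c1.toNat - 48) * 100 + (c2.toNat - 48) * 10 + (c3.toNat - 48) with hn
    have hn4 : n < 10000 := by omega
    simp only [pvM, List.mem_map]
    refine ⟨(n : Int), ?_, ?_⟩
    · rw [PySem.List.mem_pyRange_iff_of_pos (by norm_num)]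
      exact ⟨by omega, by omega, one_dvd _⟩
    · rw [← String.toList_inj, pvCur_toList n hn4, hl]
      simp only [pvEnc]
      have q0 : n / 1000 % 10 = c0.toNat - 48 := by omega
      have q1 : n / 100 % 10 = c1.toNat - 48 := by omega
      have q2 : n / 10 % 10 = c2.toNat - 48 := by omega
      have q3 : n % 10 = c3.toNat - 48 := by omega
      rw [q0, q1, q2, q3, ← e0, ← e1, ← e2, ← e3]

-- A's inner for/else filter agrees with B's ok
theorem pvValid_eq (s : String) :
    (!(PySem.List.pyRange 0 10 1).any
        (fun num => decide (3 ≤ PySem.Str.count s (PySem.Int.toStr num)))) = pvOk s := by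
  have hr : PySem.List.pyRange 0 10 1 = [0, 1, 2, 3, 4, 5, 6, 7, 8, 9] := by decide
  have hd : "0123456789".toList = ['0', '1', '2', '3', '4', '5', '6', '7', '8', '9'] := by decide
  have t0 : PySem.Int.toStr 0 = String.ofList ['0'] := by decide
  have t1 : PySem.Int.toStr 1 = String.ofList ['1'] := by decide
  have t2 : PySem.Int.toStr 2 = String.ofList ['2'] := by decide
  have t3 : PySem.Int.toStr 3 = String.ofList ['3'] := by decide
  have t4 : PySem.Int.toStr 4 = String.ofList ['4'] := by decide
  have t5 : PySem.Int.toStr 5 = String.ofList ['5'] := by decide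
  have t6 : PySem.Int.toStr 6 = String.ofList ['6'] := by decide
  have t7 : PySem.Int.toStr 7 = String.ofList ['7'] := by decide
  have t8 : PySem.Int.toStr 8 = String.ofList ['8'] := by decide
  have t9 : PySem.Int.toStr 9 = String.ofList ['9'] := by decide
  rw [pvOk, hr, hd]
  simp only [List.any_cons, List.any_nil, List.all_cons, List.all_nil,
    t0, t1, t2, t3, t4, t5, t6, t7, t8, t9,
    Bool.or_false, Bool.and_true, Bool.not_or, ← decide_not, Nat.not_le]

theorem pvCountP_map (p : String → Bool) (f : Int → String) (l : List Int) :
    (l.map f).countP p = l.countP (fun x => p (f x)) := by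
  rw [List.countP_map]
  rfl

-- A's loop as a countP over pvM
theorem pvA_loop (no : PySem.Set String) :
    (PySem.List.pyRange 0 10000 1).foldl (fun res i =>
      let cur := pvCur i
      if PySem.Set.contains no cur then res
      else if (PySem.List.pyRange 0 10 1).any
          (fun num => decide (3 ≤ PySem.Str.count cur (PySem.Int.toStr num))) then res
      else res + 1) 0
    = (pvM.countP (fun s => !PySem.Set.contains no s && pvOk s) : Int) := by
  have hbody : (fun (res : Int) (i : Int) =>
      let cur := pvCur i
      if PySem.Set.contains no cur then res
      else if (PySem.List.pyRange 0 10 1).any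
          (fun num => decide (3 ≤ PySem.Str.count cur (PySem.Int.toStr num))) then res
      else res + 1)
      = fun res i => if (!PySem.Set.contains no (pvCur i) && pvOk (pvCur i)) = true then res + 1 else res := by
    funext res i
    dsimp only []
    have hv := pvValid_eq (pvCur i)
    by_cases hm : pvCur i ∈ no
    · have h1 : PySem.Set.contains no (pvCur i) = true := (PySem.Set.contains_iff _ _).mpr hm
      simp [hm]
    · have h1 : PySem.Set.contains no (pvCur i) = false := by
        cases hcon : PySem.Set.contains no (pvCur i)
        · rfl
        · exact absurd ((PySem.Set.contains_iff _ _).mp hcon) hm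
      cases h2 : (PySem.List.pyRange 0 10 1).any
          (fun num => decide (3 ≤ PySem.Str.count (pvCur i) (PySem.Int.toStr num))) <;>
        rw [h2] at hv <;> rw [h1, ← hv] <;> simp
  rw [hbody, PySem.List.foldl_if_add_one, pvM, pvCountP_map, zero_add]

theorem pvCountP_split (P C : String → Bool) (l : List String) :
    l.countP (fun s => !C s && P s) + l.countP (fun s => C s && P s) = l.countP P := by
  induction l with
  | nil => simp
  | cons x t ih =>
    simp only [List.countP_cons]
    cases hC : C x <;> cases hP : P x <;> simp <;> omega

theorem pvSwap (P : String → Bool) (L M : List String) (hL : L.Nodup) (hM : M.Nodup) :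
    L.countP (fun s => decide (s ∈ M) && P s) = M.countP (fun s => decide (s ∈ L) && P s) := by
  rw [List.countP_eq_length_filter, List.countP_eq_length_filter]
  apply List.Perm.length_eq
  rw [List.perm_ext_iff_of_nodup (hL.filter _) (hM.filter _)]
  intro a
  simp only [List.mem_filter, decide_eq_true_iff, Bool.and_eq_true]
  tauto

theorem pvNo_nodup (p b : String) : (pvNo p b).Nodup := by
  have h : ∀ (s : PySem.Set String) (combos : List (List Char)),
      s.Nodup → (pvAddJoined s combos).Nodup := by
    intro s combos hs
    rw [pvAddJoined, ← PySem.Set.update_map_eq_foldl_add]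
    exact PySem.Set.nodup_update s _ hs
  exact h _ _ (h _ _ List.nodup_nil)

-- ===== VERDICT (by name: the statement is the Claim_ definition above) =====
theorem solution_spec : Claim_equal_solution := by
  intro p b _
  unfold Spec_solution solution solution_alt
  dsimp only []
  rw [pvA_loop, PySem.List.foldl_if_add_one, PySem.List.foldl_if_add_one]
  have hTotal : (PySem.List.pyRange 0 10000 1).countP (fun i => pvOk (pvCur i))
      = pvM.countP pvOk := by
    rw [pvM, pvCountP_map]
  have hA : pvM.countP (fun s => !PySem.Set.contains (pvNo p b) s && pvOk s)
      = pvM.countP (fun s => !decide (s ∈ pvNo p b) && pvOk s) := by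
    apply List.countP_congr
    intro x _
    have : PySem.Set.contains (pvNo p b) x = decide (x ∈ pvNo p b) := by
      by_cases hmem : x ∈ pvNo p b
      · simp [hmem]
      · have hc : PySem.Set.contains (pvNo p b) x = false := by
          cases hcon : PySem.Set.contains (pvNo p b) x
          · rfl
          · exact absurd ((PySem.Set.contains_iff _ _).mp hcon) hmem
        simp [hmem]
    rw [this]
  have hBad : (pvNo p b).countP
      (fun s => (PySem.Str.len s == 4) && PySem.Str.strIsdigit s && pvOk s)
      = (pvNo p b).countP (fun s => decide (s ∈ pvM) && pvOk s) := by
    apply List.countP_congr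
    intro x _
    simp only [Bool.and_eq_true, beq_iff_eq, decide_eq_true_iff, pvMem_M_iff,
      PySem.Str.len, PySem.Str.strIsdigit, PySem.Chars.strIsdigit, Bool.not_eq_eq_eq_not,
      Bool.not_true, List.isEmpty_eq_false_iff, Bool.and_eq_true]
    constructor
    · rintro ⟨⟨hlen, -, hall⟩, hok⟩
      exact ⟨⟨by exact_mod_cast hlen, hall⟩, hok⟩
    · rintro ⟨⟨hlen, hall⟩, hok⟩
      refine ⟨⟨by exact_mod_cast hlen, ?_, hall⟩, hok⟩
      intro hnil
      rw [hnil] at hlen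
      simp at hlen
  rw [hTotal, hA, hBad]
  have hsplit := pvCountP_split pvOk (fun s => decide (s ∈ pvNo p b)) pvM
  have hswap := pvSwap pvOk pvM (pvNo p b) pvM_nodup (pvNo_nodup p b)
  omega
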